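-- pv_equiv track=rewrite | github.com/boriskostadinov96/SoftServe-Academy | collections/priority_sort.py | priority_sort
-- ===== SOURCE A (Python) =====
-- def priority_sort(unsort_lst, pri_set):
--     if not unsort_lst:
--         return []
--
--     priority_elements = []
--     other_elements = []
--
--     for num in unsort_lst:
--         if num in pri_set:
--             priority_elements.append(num)
--         else:
--             other_elements.append(num)
--
--     priority_elements.sort()
--     other_elements.sort()
--
--     return priority_elements + other_elements
-- ===== SOURCE B (Python) =====
-- def priority_sort(unsort_lst, pri_set):
--     s = sorted(unsort_lst)
--     return [x for x in s if x in pri_set] + [x for x in s if x not in pri_set]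
-- ===== Notes on version B (the rewrite author's own statement) =====
-- stated objective: simpler
-- what changed: One sort of the whole list followed by two membership filters over the sorted data replaces the two-bucket accumulator loop with two separate sorts.
import Mathlib
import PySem

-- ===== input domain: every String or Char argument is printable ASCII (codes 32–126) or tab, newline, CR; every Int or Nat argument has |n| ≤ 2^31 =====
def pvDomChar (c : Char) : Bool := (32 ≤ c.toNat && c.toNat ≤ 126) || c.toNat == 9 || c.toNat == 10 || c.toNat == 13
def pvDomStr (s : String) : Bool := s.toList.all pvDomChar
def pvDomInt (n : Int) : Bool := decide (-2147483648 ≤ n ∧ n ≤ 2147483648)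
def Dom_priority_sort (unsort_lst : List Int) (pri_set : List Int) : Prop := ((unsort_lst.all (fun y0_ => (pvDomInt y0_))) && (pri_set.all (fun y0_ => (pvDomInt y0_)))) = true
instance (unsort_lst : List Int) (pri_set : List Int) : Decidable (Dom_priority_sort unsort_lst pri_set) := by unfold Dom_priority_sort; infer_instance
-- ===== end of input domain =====

-- ===== PORT A =====
-- B changes the decomposition (one sort + two filters instead of bucket loop + two sorts); objective: simpler.
def priority_sort (unsort_lst : List Int) (pri_set : List Int) : List Int :=
  if unsort_lst = [] then []
  else
    let acc := unsort_lst.foldl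
      (fun acc num => if num ∈ pri_set then (acc.1 ++ [num], acc.2) else (acc.1, acc.2 ++ [num]))
      ([], [])
    PySem.List.sorted acc.1 (fun x => x) false ++ PySem.List.sorted acc.2 (fun x => x) false

-- ===== PORT B =====
def priority_sort_alt (unsort_lst : List Int) (pri_set : List Int) : List Int :=
  let s := PySem.List.sorted unsort_lst (fun x => x) false
  s.filter (fun x => decide (x ∈ pri_set)) ++ s.filter (fun x => decide (x ∉ pri_set))

-- ===== PRECONDITION & SPEC =====
def Spec_priority_sort (unsort_lst : List Int) (pri_set : List Int) (out : List Int) : Prop := out = priority_sort_alt unsort_lst pri_set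
instance (unsort_lst : List Int) (pri_set : List Int) (out : List Int) : Decidable (Spec_priority_sort unsort_lst pri_set out) := by unfold Spec_priority_sort; infer_instance

-- ===== CLAIM (what is proved, stated in full; the proofs are below) =====
def Claim_equal_priority_sort : Prop := ∀ (unsort_lst : List Int) (pri_set : List Int), Dom_priority_sort unsort_lst pri_set → Spec_priority_sort unsort_lst pri_set (priority_sort unsort_lst pri_set)

-- ===== LEMMAS AND PROOFS =====

-- A's bucket loop computes the two filters of the input list.
theorem foldl_buckets (ps : List Int) (xs : List Int) (a b : List Int) :
    xs.foldl (fun acc num => if num ∈ ps then (acc.1 ++ [num], acc.2) else (acc.1, acc.2 ++ [num])) (a, b)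
      = (a ++ xs.filter (fun x => decide (x ∈ ps)), b ++ xs.filter (fun x => !decide (x ∈ ps))) := by
  induction xs generalizing a b with
  | nil => simp
  | cons x xs ih =>
    by_cases h : x ∈ ps <;> simp [h, ih]

-- Sorting a filtered list equals filtering the sorted list.
theorem sorted_filter (p : Int → Bool) (xs : List Int) :
    PySem.List.sorted (xs.filter p) (fun x => x) false
      = (PySem.List.sorted xs (fun x => x) false).filter p := by
  apply PySem.List.sorted_id_eq_of_perm_of_pairwise
  · exact (PySem.List.sorted_perm xs (fun x => x) false).filter p
  · exact (PySem.List.sorted_pairwise xs (fun x => x)).filter p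

-- ===== VERDICT (by name: the statement is the Claim_ definition above) =====
theorem priority_sort_spec : Claim_equal_priority_sort := by
  intro xs ps _
  unfold Spec_priority_sort priority_sort priority_sort_alt
  by_cases h : xs = []
  · simp [h]
  · simp only [h, if_false, foldl_buckets ps xs [] []]
    simp [← sorted_filter, decide_not]
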